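-- pv_equiv track=rewrite | github.com/luftj/MaRE | annoytest.py | get_sheet_for_id_slow
-- ===== SOURCE A (Python) =====
-- def get_sheet_for_id_slow(index_dict, NN_id):
--     desc_id = NN_id
--     for key in index_dict.keys():
--         num_descs = index_dict[key]
--         if desc_id < num_descs:
--             return key
--         else:
--             desc_id -= num_descs
--
--     raise ValueError("sheet not found for NN id %s" % NN_id)
-- ===== SOURCE B (Python) =====
-- def get_sheet_for_id_slow(index_dict, NN_id):
--     # precompute cumulative upper bounds of each key's bucket
--     bounds = []
--     total = 0
--     for c in index_dict.values():
--         total += c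
--         bounds.append(total)
--     for key, bound in zip(index_dict.keys(), bounds):
--         if NN_id < bound:
--             return key
--     raise ValueError("sheet not found for NN id %s" % NN_id)
-- ===== Notes on version B (the rewrite author's own statement) =====
-- stated objective: alternative
-- what changed: B precomputes the list of cumulative bucket upper bounds in one pass and then searches the keys zipped with those bounds with a plain comparison, instead of A's loop that mutates a decrementing remainder and re-looks each key up in the dict.
import Mathlib
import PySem

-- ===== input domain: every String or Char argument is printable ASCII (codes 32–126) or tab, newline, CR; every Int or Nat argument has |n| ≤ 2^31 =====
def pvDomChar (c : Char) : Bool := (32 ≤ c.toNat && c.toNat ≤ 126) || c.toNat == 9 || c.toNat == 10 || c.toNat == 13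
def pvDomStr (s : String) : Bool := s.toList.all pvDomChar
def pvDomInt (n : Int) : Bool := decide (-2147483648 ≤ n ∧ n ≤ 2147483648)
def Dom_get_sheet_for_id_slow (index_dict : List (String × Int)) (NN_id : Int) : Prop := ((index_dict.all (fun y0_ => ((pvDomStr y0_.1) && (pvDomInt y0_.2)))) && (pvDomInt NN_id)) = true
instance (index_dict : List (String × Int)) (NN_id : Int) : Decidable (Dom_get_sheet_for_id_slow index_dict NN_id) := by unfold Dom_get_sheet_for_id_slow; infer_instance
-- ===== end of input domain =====

-- B replaces A's decrement-and-scan loop by precomputing cumulative bucket bounds and searching keys zipped with them (alternative decomposition, same cost).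


-- ===== PORT A =====
-- loop over the dict's keys (with its value), decrementing desc_id; "" stands for the ValueError path (excluded by Pre_)
def pvAgo : List (String × Int) → Int → String
  | [], _ => ""
  | (key, num_descs) :: rest, desc_id =>
      if desc_id < num_descs then key else pvAgo rest (desc_id - num_descs)

def get_sheet_for_id_slow (index_dict : List (String × Int)) (NN_id : Int) : String :=
  pvAgo (PySem.Dict.ofList index_dict).items NN_id

-- ===== PORT B =====
-- cumulative upper bounds of the buckets, starting from running total t
def pvBounds : List Int → Int → List Int
  | [], _ => []
  | c :: rest, t => (t + c) :: pvBounds rest (t + c)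

-- scan keys zipped with their bounds; "" stands for the ValueError path (excluded by Pre_)
def pvFind : List (String × Int) → Int → String
  | [], _ => ""
  | (key, bound) :: rest, n => if n < bound then key else pvFind rest n

def get_sheet_for_id_slow_alt (index_dict : List (String × Int)) (NN_id : Int) : String :=
  let d := PySem.Dict.ofList index_dict
  pvFind (d.keys.zip (pvBounds d.values 0)) NN_id

-- ===== PRECONDITION & SPEC =====
-- Pre_: exactly the inputs where A returns (otherwise both A and B raise ValueError):
-- NN_id falls below some cumulative prefix sum of the dict's count values.
def Pre_get_sheet_for_id_slow (index_dict : List (String × Int)) (NN_id : Int) : Prop :=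
  ∃ i < (PySem.Dict.ofList index_dict).values.length,
    NN_id < (((PySem.Dict.ofList index_dict).values.take (i + 1)).sum)
instance (index_dict : List (String × Int)) (NN_id : Int) : Decidable (Pre_get_sheet_for_id_slow index_dict NN_id) := by unfold Pre_get_sheet_for_id_slow; infer_instance

def pvWitness_get_sheet_for_id_slow : (List (String × Int)) × Int := ([("a", 2), ("b", 3)], 3)

def Spec_get_sheet_for_id_slow (index_dict : List (String × Int)) (NN_id : Int) (out : String) : Prop := out = get_sheet_for_id_slow_alt index_dict NN_id
instance (index_dict : List (String × Int)) (NN_id : Int) (out : String) : Decidable (Spec_get_sheet_for_id_slow index_dict NN_id out) := by unfold Spec_get_sheet_for_id_slow; infer_instance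

-- ===== CLAIM (what is proved, stated in full; the proofs are below) =====
def Claim_equal_get_sheet_for_id_slow : Prop := ∀ (index_dict : List (String × Int)) (NN_id : Int), Dom_get_sheet_for_id_slow index_dict NN_id → Pre_get_sheet_for_id_slow index_dict NN_id → Spec_get_sheet_for_id_slow index_dict NN_id (get_sheet_for_id_slow index_dict NN_id)

-- ===== LEMMAS AND PROOFS =====
-- core invariant: A's remaining desc_id n - t versus B's running total t
theorem pvAgo_eq_pvFind (L : List (String × Int)) : ∀ (n t : Int),
    pvAgo L (n - t) = pvFind ((L.map Prod.fst).zip (pvBounds (L.map Prod.snd) t)) n := by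
  induction L with
  | nil => intro n t; rfl
  | cons p rest ih =>
      intro n t
      obtain ⟨k, c⟩ := p
      simp only [List.map, pvBounds, List.zip_cons_cons, pvAgo, pvFind]
      by_cases h : n < t + c
      · rw [if_pos (by omega : n - t < c), if_pos h]
      · rw [if_neg (by omega : ¬ n - t < c), if_neg h,
            (by ring : n - t - c = n - (t + c)), ih n (t + c)]

-- ===== VERDICT (by name: the statement is the Claim_ definition above) =====
theorem get_sheet_for_id_slow_spec : Claim_equal_get_sheet_for_id_slow := by
  intro index_dict NN_id _ _
  unfold Spec_get_sheet_for_id_slow get_sheet_for_id_slow get_sheet_for_id_slow_alt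
  have h := pvAgo_eq_pvFind (PySem.Dict.ofList index_dict).items NN_id 0
  rw [sub_zero] at h
  simpa [PySem.Dict.keys, PySem.Dict.values] using h
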